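-- pv_equiv track=rewrite | github.com/takana96cha5/ore-ore-lib | util/fireEmployees.py | fireEmployees
-- ===== SOURCE A (Python) =====
-- def fireEmployees(employees:str,unemployed:str) -> str:
--
--     # 空の辞書を作成
--     employeesList = {}
--
--     for i in employees:
--         employeesList[i] = True     # {'○○': True, '△△': True}を作る
--
--     for i in unemployed:
--         employeesList[i] = False    # unemplyedに名前がある人は↑から'○○': Falseになる
--
--     # 来月残留する従業員リスト
--     newEmplyeesList = []
--
--     for i in employees:
--         if employeesList[i]:
--             newEmplyeesList.append(i)
--
--     return newEmplyeesList
-- ===== SOURCE B (Python) =====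
-- def fireEmployees(employees: str, unemployed: str) -> str:
--     # Divide and conquer: split the employees string in half, filter each half
--     # recursively, and concatenate; a single character is kept iff it does not
--     # occur in `unemployed`. No dict/set is built or maintained.
--     if len(employees) == 0:
--         return []
--     if len(employees) == 1:
--         return [] if employees in unemployed else [employees]
--     mid = len(employees) // 2
--     return fireEmployees(employees[:mid], unemployed) + fireEmployees(employees[mid:], unemployed)
-- ===== Notes on version B (the rewrite author's own statement) =====
-- stated objective: alternative
-- what changed: Replaced A's three staged passes over a boolean marking dict by a divide-and-conquer recursion: split the employees string in half, filter each half recursively (a single character is kept iff it is not in unemployed, tested directly on the string), and concatenate - no auxiliary structure is built or maintained.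
import Mathlib
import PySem

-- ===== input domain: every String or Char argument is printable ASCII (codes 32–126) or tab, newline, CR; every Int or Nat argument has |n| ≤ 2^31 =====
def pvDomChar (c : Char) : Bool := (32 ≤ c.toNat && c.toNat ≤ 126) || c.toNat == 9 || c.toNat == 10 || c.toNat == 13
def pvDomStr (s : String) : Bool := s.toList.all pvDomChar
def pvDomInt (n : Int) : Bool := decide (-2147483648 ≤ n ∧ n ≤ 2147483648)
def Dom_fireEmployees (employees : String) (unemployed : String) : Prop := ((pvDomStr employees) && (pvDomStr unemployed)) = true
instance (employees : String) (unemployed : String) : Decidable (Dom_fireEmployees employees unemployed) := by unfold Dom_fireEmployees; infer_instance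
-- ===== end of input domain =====

-- B replaces A's three-pass boolean-dict marking by a divide-and-conquer recursion on the employees string testing characters directly against unemployed (alternative decomposition; same return value).


-- ===== PORT A =====
-- builds {char: True} for employees, overwrites unemployed chars to False, then re-scans employees
def fireEmployees (employees : String) (unemployed : String) : List String :=
  let d1 : PySem.Dict Char Bool :=
    employees.toList.foldl (fun d c => d.insert c true) PySem.Dict.empty
  let d2 : PySem.Dict Char Bool :=
    unemployed.toList.foldl (fun d c => d.insert c false) d1
  employees.toList.foldl
    (fun acc c => if d2.getD c false then acc ++ [String.ofList [c]] else acc) []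

-- ===== PORT B =====
-- divide-and-conquer on the characters of employees; a length-1 string `s in unemployed`
-- is exactly membership of its character in the string's characters
def fireEmployeesAltGo (cs : List Char) (unemployed : String) : List String :=
  match cs with
  | [] => []
  | [c] => if c ∈ unemployed.toList then [] else [String.ofList [c]]
  | a :: b :: rest =>
    let full := a :: b :: rest
    let mid := full.length / 2
    fireEmployeesAltGo (full.take mid) unemployed ++ fireEmployeesAltGo (full.drop mid) unemployed
termination_by cs.length
decreasing_by
  · simp [List.length_take]; omega
  · simp; omega

def fireEmployees_alt (employees : String) (unemployed : String) : List String :=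
  fireEmployeesAltGo employees.toList unemployed

-- ===== PRECONDITION & SPEC =====
def Spec_fireEmployees (employees : String) (unemployed : String) (out : List String) : Prop := out = fireEmployees_alt employees unemployed
instance (employees : String) (unemployed : String) (out : List String) : Decidable (Spec_fireEmployees employees unemployed out) := by unfold Spec_fireEmployees; infer_instance

-- ===== CLAIM (what is proved, stated in full; the proofs are below) =====
def Claim_equal_fireEmployees : Prop := ∀ (employees : String) (unemployed : String), Dom_fireEmployees employees unemployed → Spec_fireEmployees employees unemployed (fireEmployees employees unemployed)

-- ===== LEMMAS AND PROOFS =====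

-- lookup after a loop inserting one constant value for every key of l
theorem getD_foldl_insert_const {κ ν : Type} [BEq κ] [LawfulBEq κ] [DecidableEq κ]
    (l : List κ) (v dflt : ν) (d : PySem.Dict κ ν) (k : κ) :
    (l.foldl (fun d c => d.insert c v) d).getD k dflt
      = if k ∈ l then v else d.getD k dflt := by
  induction l generalizing d with
  | nil => simp
  | cons c t ih =>
    simp only [List.foldl_cons, ih, PySem.Dict.getD_insert, List.mem_cons]
    by_cases hk : k ∈ t <;> by_cases hc : k = c <;> simp [hk, hc]

-- B's recursion computes the filtered-and-wrapped character list
theorem altGo_eq_filter (cs : List Char) (u : String) :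
    fireEmployeesAltGo cs u
      = (cs.filter (fun c => !decide (c ∈ u.toList))).map (fun c => String.ofList [c]) := by
  fun_induction fireEmployeesAltGo cs u
  all_goals first
    | rfl
    | (rename_i ih1 ih2
       rw [ih1, ih2, ← List.map_append, ← List.filter_append, List.take_append_drop]
       done)
    | (rename_i c h; simp [h]; done)

-- ===== VERDICT (by name: the statement is the Claim_ definition above) =====
theorem fireEmployees_spec : Claim_equal_fireEmployees := by
  intro employees unemployed _
  unfold Spec_fireEmployees fireEmployees fireEmployees_alt
  rw [PySem.List.foldl_append_if, altGo_eq_filter]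
  show _ = List.map _ (List.filter _ _)
  rw [List.nil_append]
  congr 1
  apply List.filter_congr
  intro c hc
  rw [getD_foldl_insert_const, getD_foldl_insert_const]
  by_cases hu : c ∈ unemployed.toList
  · simp [hu]
  · simp [hu, hc]
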